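-- pv_equiv track=rewrite | github.com/IsaacG/Advent-of-Code | 2023/d02.py | part2
-- ===== SOURCE A (Python) =====
-- import math
--
-- InputType = dict[int, list[dict[str, int]]]
--
-- def part2(puzzle_input: InputType) -> int:
--     """Return the per-color minimum if all bunches are valid."""
--     return sum(
--         math.prod(
--             max(bunch.get(i, 0) for bunch in bunches)
--             for i in ["red", "green", "blue"]
--         )
--         for bunches in puzzle_input.values()
--     )
-- ===== SOURCE B (Python) =====
-- def part2(puzzle_input):
--     colors = ("red", "green", "blue")
--     total = 0
--     for bunches in puzzle_input.values():
--         records = sorted(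
--             ((c, bunch.get(c, 0)) for bunch in bunches for c in colors),
--             key=lambda r: r[1],
--             reverse=True,
--         )
--         best = {}
--         for c, n in records:
--             if c not in best:
--                 best[c] = n
--         total += best.get("red", 0) * best.get("green", 0) * best.get("blue", 0)
--     return total
-- ===== Notes on version B (the rewrite author's own statement) =====
-- stated objective: alternative
-- what changed: Instead of rescanning all bunches once per color with max() and math.prod, B flattens each game into (color,count) records, does one stable sort by count descending, then a single first-seen dict scan picks each color's maximum before multiplying.
-- crash fix: On inputs where some game has an empty bunch list A raises ValueError (max of an empty sequence); B returns the sum with that game contributing 0. — e.g. on part2([(1, [])]): A raises ValueError, B returns 0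
import Mathlib
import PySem

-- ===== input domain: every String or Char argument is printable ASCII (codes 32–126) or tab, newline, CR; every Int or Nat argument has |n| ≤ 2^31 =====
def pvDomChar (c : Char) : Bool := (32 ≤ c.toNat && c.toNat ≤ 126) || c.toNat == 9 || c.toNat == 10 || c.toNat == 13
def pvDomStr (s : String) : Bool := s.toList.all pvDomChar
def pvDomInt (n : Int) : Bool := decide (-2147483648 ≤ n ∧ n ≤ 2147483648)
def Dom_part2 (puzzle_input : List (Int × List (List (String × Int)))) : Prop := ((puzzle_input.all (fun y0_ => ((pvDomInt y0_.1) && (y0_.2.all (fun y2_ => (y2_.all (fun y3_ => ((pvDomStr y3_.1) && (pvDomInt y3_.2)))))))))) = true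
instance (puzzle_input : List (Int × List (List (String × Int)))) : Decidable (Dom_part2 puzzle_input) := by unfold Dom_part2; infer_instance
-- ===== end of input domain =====

-- B replaces A's three per-color max() rescans of each game's bunches by flattening the game
-- into (color, count) records, one stable sort by count descending, and a first-seen dict scan.

-- ===== PORT A =====
-- bunch.get(i, 0) on the association-list encoding of a dict: first match, default 0 (exact)
def bunchGetD (bunch : List (String × Int)) (i : String) : Int :=
  (List.lookup i bunch).getD 0

-- literal port of A's nested generator expression: sum over games of
-- prod over ["red","green","blue"] of max over bunches of bunch.get(i, 0).
-- Python's max(...) raises ValueError on an empty bunches list; there the port's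
-- `.getD 0` is unreached under Pre_part2.
def part2 (puzzle_input : List (Int × List (List (String × Int)))) : Int :=
  ((puzzle_input.map (fun bunches =>
      ((["red", "green", "blue"].map (fun i =>
          (PySem.List.max? (bunches.2.map (fun bunch => bunchGetD bunch i))
            (fun y => y)).getD 0)).foldl (· * ·) 1))).foldl (· + ·) 0)

-- ===== PORT B =====
-- literal port of Source B: per game, flatten to (color, count) records, stable sort by
-- count descending, then a first-seen pass into the dict `best`, and multiply.
def part2_alt (puzzle_input : List (Int × List (List (String × Int)))) : Int :=
  puzzle_input.foldl (fun total game =>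
    let records := PySem.List.sorted
      (game.2.flatMap (fun bunch =>
        ["red", "green", "blue"].map (fun c => (c, (List.lookup c bunch).getD 0))))
      (fun r => r.2) true
    let best := records.foldl
      (fun (d : PySem.Dict String Int) r =>
        if d.contains r.1 then d else d.insert r.1 r.2)
      PySem.Dict.empty
    total + (best.getD "red" 0) * (best.getD "green" 0) * (best.getD "blue" 0)) 0

-- ===== PRECONDITION & SPEC =====
-- Pre_ excludes exactly the inputs where some game has an empty bunch list: there A raises
-- ValueError (max of an empty sequence) while B returns normally (see Raises_part2).
def Pre_part2 (puzzle_input : List (Int × List (List (String × Int)))) : Prop :=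
  (puzzle_input.all (fun g => !g.2.isEmpty)) = true
instance (puzzle_input : List (Int × List (List (String × Int)))) : Decidable (Pre_part2 puzzle_input) := by unfold Pre_part2; infer_instance

def pvWitness_part2 : (List (Int × List (List (String × Int)))) :=
  [(1, [[("red", 2), ("blue", 1)], [("green", 3)]])]

-- On inputs where some game has an empty bunch list A raises ValueError (max of an empty
-- sequence); B returns the sum with that game contributing 0.
def Raises_part2 (puzzle_input : List (Int × List (List (String × Int)))) : Prop :=
  (puzzle_input.any (fun g => g.2.isEmpty)) = true
instance (puzzle_input : List (Int × List (List (String × Int)))) : Decidable (Raises_part2 puzzle_input) := by unfold Raises_part2; infer_instance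

def pvRaiseWitness_part2 : (List (Int × List (List (String × Int)))) := [(1, [])]
def pvRaiseWitnessOut_part2 : Int := 0

def Spec_part2 (puzzle_input : List (Int × List (List (String × Int)))) (out : Int) : Prop := out = part2_alt puzzle_input
instance (puzzle_input : List (Int × List (List (String × Int)))) (out : Int) : Decidable (Spec_part2 puzzle_input out) := by unfold Spec_part2; infer_instance

-- ===== CLAIM (what is proved, stated in full; the proofs are below) =====
def Claim_equal_part2 : Prop := ∀ (puzzle_input : List (Int × List (List (String × Int)))), Dom_part2 puzzle_input → Pre_part2 puzzle_input → Spec_part2 puzzle_input (part2 puzzle_input)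
def Claim_raises_part2 : Prop := (∀ (puzzle_input : List (Int × List (List (String × Int)))), Dom_part2 puzzle_input → Raises_part2 puzzle_input → ¬ Pre_part2 puzzle_input) ∧ (Dom_part2 (pvRaiseWitness_part2) ∧ Raises_part2 (pvRaiseWitness_part2) ∧ part2_alt (pvRaiseWitness_part2) = pvRaiseWitnessOut_part2)

-- ===== LEMMAS AND PROOFS =====

-- the first-seen dict fold looks up as the FIRST record with that color
theorem bestGet (c : String) (S : List (String × Int)) :
    ∀ d : PySem.Dict String Int,
      (S.foldl (fun d r => if d.contains r.1 then d else d.insert r.1 r.2) d).get? c =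
        (d.get? c).or ((S.find? (fun r => r.1 == c)).map (·.2)) := by
  induction S with
  | nil => intro d; simp
  | cons r S ih =>
      intro d
      rw [List.foldl_cons, List.find?_cons]
      by_cases hd : d.contains r.1 = true
      · simp only [hd, if_true, ih]
        by_cases hc : r.1 == c
        · have hce : r.1 = c := by simpa using hc
          have : (d.get? c).isSome := by
            rw [← hce, ← PySem.Dict.contains_eq_isSome_get?]; exact hd
          obtain ⟨v, hv⟩ := Option.isSome_iff_exists.mp this
          simp [hc, hv]
        · simp [hc]
      · rw [Bool.not_eq_true] at hd
        simp only [hd, Bool.false_eq_true, if_false, ih]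
        by_cases hc : r.1 == c
        · have hce : r.1 = c := by simpa using hc
          have hn : d.get? c = none := by
            rw [← hce]
            have := PySem.Dict.contains_eq_isSome_get? d r.1
            cases h : d.get? r.1
            · rfl
            · rw [h] at this; simp [this] at hd
          rw [PySem.Dict.get?_insert]
          simp [hce, hn]
        · have hce : ¬ c = r.1 := fun h => by simp [h] at hc
          rw [PySem.Dict.get?_insert]
          simp [hce, hc]

-- in a list sorted by count descending, the first record of a color carries that color's max
theorem find_sorted_max (c : String) (S : List (String × Int))
    (hp : S.Pairwise (fun a b => b.2 ≤ a.2)) (r : String × Int)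
    (hf : S.find? (fun r => r.1 == c) = some r) :
    ∀ p ∈ S, p.1 = c → p.2 ≤ r.2 := by
  induction S with
  | nil => simp at hf
  | cons x t ih =>
      rw [List.find?_cons] at hf
      rw [List.pairwise_cons] at hp
      intro p hpmem hpc
      by_cases hx : x.1 == c
      · simp only [hx] at hf
        have hrx : r = x := by simpa using hf.symm
        subst hrx
        rcases List.mem_cons.mp hpmem with h | h
        · exact le_of_eq (congrArg Prod.snd h)
        · exact hp.1 p h
      · simp only [hx] at hf
        rcases List.mem_cons.mp hpmem with h | h
        · exact absurd (h ▸ hpc) (by simpa using hx)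
        · exact ih hp.2 hf p h hpc

-- the records of a game that carry color c are exactly the per-bunch get(c, 0) values
theorem mem_records_iff (bunches : List (List (String × Int))) (c : String)
    (hc : c ∈ (["red", "green", "blue"] : List String)) (m : Int) :
    ((c, m) ∈ bunches.flatMap (fun bunch =>
        ["red", "green", "blue"].map (fun col => (col, (List.lookup col bunch).getD 0)))) ↔
      ∃ b ∈ bunches, m = (List.lookup c b).getD 0 := by
  simp only [List.mem_flatMap, List.mem_map, Prod.mk.injEq]
  constructor
  · rintro ⟨b, hb, col, _, hcol, hm⟩
    exact ⟨b, hb, by rw [← hm, ← hcol]⟩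
  · rintro ⟨b, hb, hm⟩
    exact ⟨b, hb, c, by simpa using hc, rfl, hm.symm⟩

-- per color, on a nonempty game, B's first-seen lookup equals A's max?-value
theorem color_eq (bunches : List (List (String × Int))) (hb : bunches ≠ [])
    (c : String) (hc : c ∈ (["red", "green", "blue"] : List String)) :
    (((PySem.List.sorted
        (bunches.flatMap (fun bunch =>
          ["red", "green", "blue"].map (fun col => (col, (List.lookup col bunch).getD 0))))
        (fun r => r.2) true).foldl
      (fun (d : PySem.Dict String Int) r =>
        if d.contains r.1 then d else d.insert r.1 r.2)
      PySem.Dict.empty).getD c 0) =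
    (PySem.List.max? (bunches.map (fun bunch => bunchGetD bunch c)) (fun y => y)).getD 0 := by
  set R := bunches.flatMap (fun bunch =>
      ["red", "green", "blue"].map (fun col => (col, (List.lookup col bunch).getD 0))) with hR
  set S := PySem.List.sorted R (fun r => r.2) true with hS
  have hvals : bunches.map (fun bunch => bunchGetD bunch c) ≠ [] := by
    simpa using hb
  obtain ⟨M, hMsome⟩ : ∃ M, PySem.List.max? (bunches.map (fun bunch => bunchGetD bunch c)) (fun y => y) = some M := by
    cases h : PySem.List.max? (bunches.map (fun bunch => bunchGetD bunch c)) (fun y => y) with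
    | none => exact absurd ((PySem.List.max?_eq_none_iff _ _).mp h) hvals
    | some M => exact ⟨M, rfl⟩
  have hM1 : M ∈ bunches.map (fun bunch => bunchGetD bunch c) := PySem.List.max?_mem hMsome
  have hM2 : ∀ y ∈ bunches.map (fun bunch => bunchGetD bunch c), y ≤ M :=
    PySem.List.max?_isMax hMsome
  have hMvals : ∃ b ∈ bunches, M = (List.lookup c b).getD 0 := by
    obtain ⟨b, hbm, hbe⟩ := List.mem_map.mp hM1
    exact ⟨b, hbm, by rw [← hbe]; rfl⟩
  have hMR : (c, M) ∈ R := (mem_records_iff bunches c hc M).mpr hMvals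
  have hMS : (c, M) ∈ S := (PySem.List.mem_sorted R (fun r => r.2) true (c, M)).mpr hMR
  obtain ⟨r, hf⟩ : ∃ r, S.find? (fun r => r.1 == c) = some r := by
    have : (S.find? (fun r => r.1 == c)).isSome := List.find?_isSome.mpr ⟨(c, M), hMS, by simp⟩
    exact Option.isSome_iff_exists.mp this
  have hrc : r.1 = c := by simpa using List.find?_some hf
  have hrS : r ∈ S := List.mem_of_find?_eq_some hf
  have hrR : (c, r.2) ∈ R := by
    rw [← hrc]; exact (PySem.List.mem_sorted R (fun r => r.2) true r).mp hrS
  have hrvals : r.2 ∈ bunches.map (fun bunch => bunchGetD bunch c) := by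
    obtain ⟨b, hbm, hbe⟩ := (mem_records_iff bunches c hc r.2).mp hrR
    exact List.mem_map.mpr ⟨b, hbm, hbe.symm⟩
  have h1 : r.2 ≤ M := hM2 _ hrvals
  have h2 : M ≤ r.2 :=
    find_sorted_max c S (PySem.List.sorted_pairwise_rev R (fun r => r.2)) r hf (c, M) hMS rfl
  have hrM : r.2 = M := le_antisymm h1 h2
  rw [PySem.Dict.getD_eq_get?_getD, bestGet, PySem.Dict.get?_empty, Option.none_or, hf, hMsome]
  simp [hrM]

-- per game, on a nonempty bunch list, B's loop body value equals A's product term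
theorem game_eq (bunches : List (List (String × Int))) (hb : bunches ≠ []) :
    (let records := PySem.List.sorted
      (bunches.flatMap (fun bunch =>
        ["red", "green", "blue"].map (fun c => (c, (List.lookup c bunch).getD 0))))
      (fun r => r.2) true
    let best := records.foldl
      (fun (d : PySem.Dict String Int) r =>
        if d.contains r.1 then d else d.insert r.1 r.2)
      PySem.Dict.empty
    (best.getD "red" 0) * (best.getD "green" 0) * (best.getD "blue" 0)) =
    ((["red", "green", "blue"].map (fun i =>
        (PySem.List.max? (bunches.map (fun bunch => bunchGetD bunch i))
          (fun y => y)).getD 0)).foldl (· * ·) 1) := by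
  dsimp only
  rw [color_eq bunches hb "red" (by simp), color_eq bunches hb "green" (by simp),
      color_eq bunches hb "blue" (by simp)]
  simp only [List.map_cons, List.map_nil, List.foldl_cons, List.foldl_nil]
  ring

theorem foldl_games (l : List (Int × List (List (String × Int)))) (hl : Pre_part2 l) :
    ∀ acc : Int,
      l.foldl (fun x y => x +
          ((["red", "green", "blue"].map (fun i =>
              (PySem.List.max? (y.2.map (fun bunch => bunchGetD bunch i))
                (fun y => y)).getD 0)).foldl (· * ·) 1)) acc =
      l.foldl (fun total game =>
          let records := PySem.List.sorted
            (game.2.flatMap (fun bunch =>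
              ["red", "green", "blue"].map (fun c => (c, (List.lookup c bunch).getD 0))))
            (fun r => r.2) true
          let best := records.foldl
            (fun (d : PySem.Dict String Int) r =>
              if d.contains r.1 then d else d.insert r.1 r.2)
            PySem.Dict.empty
          total + (best.getD "red" 0) * (best.getD "green" 0) * (best.getD "blue" 0)) acc := by
  induction l with
  | nil => intro acc; rfl
  | cons x xs ih =>
      intro acc
      have hx : x.2 ≠ [] := by
        simp only [Pre_part2, List.all_cons, Bool.and_eq_true, Bool.not_eq_true',
          List.isEmpty_eq_false_iff] at hl
        exact hl.1
      have hxs : Pre_part2 xs := by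
        simp only [Pre_part2, List.all_cons, Bool.and_eq_true] at hl
        exact hl.2
      simp only [List.foldl_cons]
      rw [← game_eq x.2 hx]
      exact ih hxs _

theorem part2_eq_alt (pi : List (Int × List (List (String × Int))))
    (hp : Pre_part2 pi) : part2 pi = part2_alt pi := by
  unfold part2 part2_alt
  rw [List.foldl_map]
  exact foldl_games pi hp 0

-- ===== VERDICT (by name: the statement is the Claim_ definition above; part2_spec proves
-- Claim_equal_part2 and part2_raises proves Claim_raises_part2) =====
theorem part2_spec : Claim_equal_part2 := by
  intro pi _ hp
  unfold Spec_part2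
  exact part2_eq_alt pi hp

theorem part2_raises : Claim_raises_part2 := by
  unfold Claim_raises_part2
  refine ⟨?_, by decide⟩
  intro pi _ hr hp
  simp only [Raises_part2, List.any_eq_true] at hr
  simp only [Pre_part2, List.all_eq_true] at hp
  obtain ⟨g, hg, he⟩ := hr
  have := hp g hg
  simp [he] at this

-- self-check reading the crash-fix claim back: B's port returns the stated literal at the raise witness
theorem part2_raise_witness_ok : part2_alt (pvRaiseWitness_part2) = pvRaiseWitnessOut_part2 :=
  part2_raises.2.2.2
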